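-- pv_equiv track=rewrite | github.com/5k4nd/cinema | cinema/cinemas_sources/besancon_scraper.py | _get_next_month
-- ===== SOURCE A (Python) =====
-- MONTHS_FR = (
--     "janvier",
--     "fevrier",
--     "mars",
--     "avril",
--     "mai",
--     "juin",
--     "juillet",
--     "aout",
--     "septembre",
--     "octobre",
--     "novembre",
--     "decembre",
-- )
--
-- def _get_next_month(month: str):
--     must_return = False
--     for cur_month in MONTHS_FR:
--         if must_return:
--             return cur_month
--         elif cur_month == month:
--             must_return = True
--     # default case: decembre must return janvier
--     return MONTHS_FR[0]
-- ===== SOURCE B (Python) =====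
-- MONTHS_FR = (
--     "janvier",
--     "fevrier",
--     "mars",
--     "avril",
--     "mai",
--     "juin",
--     "juillet",
--     "aout",
--     "septembre",
--     "octobre",
--     "novembre",
--     "decembre",
-- )
--
-- def _get_next_month(month: str):
--     # position arithmetic: successor index modulo 12; unknown months take
--     # position -1, so (i + 1) % 12 == 0 yields janvier, as for decembre.
--     i = MONTHS_FR.index(month) if month in MONTHS_FR else -1
--     return MONTHS_FR[(i + 1) % len(MONTHS_FR)]
-- ===== Notes on version B (the rewrite author's own statement) =====
-- stated objective: alternative
-- what changed: Replaces A's flag-carrying sequential scan for the successor element with position arithmetic: look up the month's index (-1 for unknown) and return the element at (i+1) mod 12, so the decembre/unknown wraparound falls out of the modulus instead of a default branch.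
import Mathlib
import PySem

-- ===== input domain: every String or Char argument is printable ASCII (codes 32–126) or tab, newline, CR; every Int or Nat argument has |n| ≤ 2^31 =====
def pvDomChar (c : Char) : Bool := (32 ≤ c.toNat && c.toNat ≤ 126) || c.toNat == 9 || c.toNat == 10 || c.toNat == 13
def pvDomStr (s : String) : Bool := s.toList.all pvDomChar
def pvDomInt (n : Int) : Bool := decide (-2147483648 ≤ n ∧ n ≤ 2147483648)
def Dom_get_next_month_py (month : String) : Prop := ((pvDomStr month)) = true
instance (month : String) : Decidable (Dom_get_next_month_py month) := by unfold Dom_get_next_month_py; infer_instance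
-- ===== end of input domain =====

-- B replaces A's flag-carrying successor scan with index arithmetic: (index+1) mod 12, with -1 for unknown months (alternative; same values).

def MONTHS_FR : List String :=
  ["janvier", "fevrier", "mars", "avril", "mai", "juin",
   "juillet", "aout", "septembre", "octobre", "novembre", "decembre"]

-- ===== PORT A =====
-- the for-loop with its must_return flag; the early 'return cur_month' is the first branch
def getNextLoop (month : String) : List String → Bool → String
  | [], _ => MONTHS_FR.headD ""          -- return MONTHS_FR[0]
  | cur :: rest, must_return =>
      if must_return then cur
      else if cur == month then getNextLoop month rest true
      else getNextLoop month rest must_return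

def get_next_month_py (month : String) : String :=
  getNextLoop month MONTHS_FR false

-- ===== PORT B =====
-- i = MONTHS_FR.index(month) if month in MONTHS_FR else -1
-- return MONTHS_FR[(i + 1) % len(MONTHS_FR)]
def get_next_month_py_alt (month : String) : String :=
  let i : Int :=
    if month ∈ MONTHS_FR then ((PySem.List.index? MONTHS_FR month).getD 0 : Nat) else -1
  (PySem.List.pyGet? MONTHS_FR (PySem.Int.mod (i + 1) (MONTHS_FR.length : Int))).getD ""

-- ===== PRECONDITION & SPEC =====
def Spec_get_next_month_py (month : String) (out : String) : Prop := out = get_next_month_py_alt month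
instance (month : String) (out : String) : Decidable (Spec_get_next_month_py month out) := by unfold Spec_get_next_month_py; infer_instance

-- ===== CLAIM (what is proved, stated in full; the proofs are below) =====
def Claim_equal_get_next_month_py : Prop := ∀ (month : String), Dom_get_next_month_py month → Spec_get_next_month_py month (get_next_month_py month)

-- ===== LEMMAS AND PROOFS =====
theorem a_eq_b (month : String) : get_next_month_py month = get_next_month_py_alt month := by
  by_cases h1 : month = "janvier"; · subst h1; decide
  by_cases h2 : month = "fevrier"; · subst h2; decide
  by_cases h3 : month = "mars"; · subst h3; decide
  by_cases h4 : month = "avril"; · subst h4; decide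
  by_cases h5 : month = "mai"; · subst h5; decide
  by_cases h6 : month = "juin"; · subst h6; decide
  by_cases h7 : month = "juillet"; · subst h7; decide
  by_cases h8 : month = "aout"; · subst h8; decide
  by_cases h9 : month = "septembre"; · subst h9; decide
  by_cases h10 : month = "octobre"; · subst h10; decide
  by_cases h11 : month = "novembre"; · subst h11; decide
  by_cases h12 : month = "decembre"; · subst h12; decide
  have hmem : month ∉ MONTHS_FR := by
    simp [MONTHS_FR, h1, h2, h3, h4, h5, h6, h7, h8, h9, h10, h11, h12]
  simp only [get_next_month_py, get_next_month_py_alt, if_neg hmem]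
  have hA : getNextLoop month MONTHS_FR false = "janvier" := by
    simp [getNextLoop, MONTHS_FR,
      Ne.symm h1, Ne.symm h2, Ne.symm h3, Ne.symm h4, Ne.symm h5, Ne.symm h6,
      Ne.symm h7, Ne.symm h8, Ne.symm h9, Ne.symm h10, Ne.symm h11, Ne.symm h12]
  rw [hA]; decide

-- ===== VERDICT (by name: the statement is the Claim_ definition above) =====
theorem get_next_month_py_spec : Claim_equal_get_next_month_py := by
  intro month _
  unfold Spec_get_next_month_py
  exact a_eq_b month
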